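-- pv_equiv track=rewrite | github.com/serizawan/aoc | 2020/p14/p14b.py | get_address_pattern
-- ===== SOURCE A (Python) =====
-- def get_address_pattern(mask, value):
--     # Skip '0b' two first characters of a binary string in Python
--     value_as_bin_str = bin(value)[2:]
--     # Iterate through reversed list to start with less significant bit.
--     rev_mask = mask[::-1]
--     address_pattern = ''
--     for i, b in enumerate(rev_mask):
--         if b == '0':
--             bit_value = value_as_bin_str[::-1][i] if i < len(value_as_bin_str) else '0'
--             # Don't use += here to append b on the left of address_pattern
--             address_pattern = bit_value + address_pattern
--         elif b == '1':
--             address_pattern = b + address_pattern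
--         else:
--             address_pattern = 'X' + address_pattern
--     return address_pattern
-- ===== SOURCE B (Python) =====
-- def get_address_pattern(mask, value):
--     # Align the value's binary digits with the mask (truncate high bits,
--     # left-pad with '0'), then one forward pass over the zipped pair.
--     vb = bin(value)[2:]
--     tail = vb[-len(mask):] if mask else ''
--     padded = '0' * (len(mask) - len(tail)) + tail
--     return ''.join(p if m == '0' else m if m == '1' else 'X'
--                    for m, p in zip(mask, padded))
-- ===== Notes on version B (the rewrite author's own statement) =====
-- stated objective: faster
-- what changed: B replaces A's reversed iteration with per-index value-string reversal and left-prepending by normalizing the value bits once (truncate to mask length, left-pad with '0') and a single forward zip pass joined at the end.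
import Mathlib
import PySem

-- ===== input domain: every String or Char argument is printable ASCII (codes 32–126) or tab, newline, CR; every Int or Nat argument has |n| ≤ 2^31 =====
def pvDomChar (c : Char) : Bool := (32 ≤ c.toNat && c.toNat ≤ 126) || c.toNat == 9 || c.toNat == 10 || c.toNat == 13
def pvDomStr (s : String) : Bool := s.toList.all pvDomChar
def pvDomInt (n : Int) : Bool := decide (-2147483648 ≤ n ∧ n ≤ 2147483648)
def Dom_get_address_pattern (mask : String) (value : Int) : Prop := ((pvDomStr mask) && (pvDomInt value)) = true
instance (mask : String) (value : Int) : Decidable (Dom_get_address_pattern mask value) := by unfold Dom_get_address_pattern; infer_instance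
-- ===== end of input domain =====

-- B normalizes the value bits once and does a single forward zip pass instead of A's
-- reversed loop with per-index bounds checks and left-prepending; return values are equal.

-- shared helper: hand port of Python's bin(n) (exact: '0b'/-0b' prefix, MSB-first digits)
def pvNatBin (n : Nat) : List Char :=
  if h : n = 0 then [] else pvNatBin (n / 2) ++ [if n % 2 = 1 then '1' else '0']
decreasing_by exact Nat.div_lt_self (Nat.pos_of_ne_zero h) (by norm_num)

def pvBin (v : Int) : List Char :=
  if v < 0 then '-' :: '0' :: 'b' :: pvNatBin (-v).toNat
  else '0' :: 'b' :: (if v = 0 then ['0'] else pvNatBin v.toNat)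

-- ===== PORT A =====
def get_address_pattern (mask : String) (value : Int) : String :=
  -- value_as_bin_str = bin(value)[2:]
  let value_as_bin_str := PySem.List.slice (pvBin value) (some 2) none
  -- rev_mask = mask[::-1]
  let rev_mask := mask.toList.reverse
  -- for i, b in enumerate(rev_mask): prepend the chosen character
  let address_pattern := (PySem.List.enumerate rev_mask).foldl
    (fun acc p =>
      if p.2 = '0' then
        -- bit_value = value_as_bin_str[::-1][i] if i < len(value_as_bin_str) else '0'
        (if p.1 < (value_as_bin_str.length : Int) then
           PySem.List.pyGetD value_as_bin_str.reverse p.1 '?' else '0') :: acc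
      else if p.2 = '1' then p.2 :: acc
      else 'X' :: acc) []
  String.ofList address_pattern

-- ===== PORT B =====
def get_address_pattern_alt (mask : String) (value : Int) : String :=
  let vb := PySem.List.slice (pvBin value) (some 2) none
  -- tail = vb[-len(mask):] if mask else ''
  let tail := if mask.toList = [] then []
              else PySem.List.slice vb (some (-(mask.toList.length : Int))) none
  -- padded = '0' * (len(mask) - len(tail)) + tail
  let padded := List.replicate (mask.toList.length - tail.length) '0' ++ tail
  String.ofList ((mask.toList.zip padded).map
    (fun q => if q.1 = '0' then q.2 else if q.1 = '1' then q.1 else 'X'))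

-- ===== PRECONDITION & SPEC =====
def Spec_get_address_pattern (mask : String) (value : Int) (out : String) : Prop := out = get_address_pattern_alt mask value
instance (mask : String) (value : Int) (out : String) : Decidable (Spec_get_address_pattern mask value out) := by unfold Spec_get_address_pattern; infer_instance

-- ===== CLAIM (what is proved, stated in full; the proofs are below) =====
def Claim_equal_get_address_pattern : Prop := ∀ (mask : String) (value : Int), Dom_get_address_pattern mask value → Spec_get_address_pattern mask value (get_address_pattern mask value)

-- ===== LEMMAS AND PROOFS =====

-- A's per-step character, as a function of the enumerate pair
def pvBitA (vb : List Char) (p : Int × Char) : Char :=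
  if p.2 = '0' then
    (if p.1 < (vb.length : Int) then PySem.List.pyGetD vb.reverse p.1 '?' else '0')
  else if p.2 = '1' then p.2 else 'X'

theorem pv_foldA (vb : List Char) :
    ∀ (l : List (Int × Char)) (acc : List Char),
      l.foldl (fun acc p =>
        if p.2 = '0' then
          (if p.1 < (vb.length : Int) then
             PySem.List.pyGetD vb.reverse p.1 '?' else '0') :: acc
        else if p.2 = '1' then p.2 :: acc
        else 'X' :: acc) acc
      = (l.map (pvBitA vb)).reverse ++ acc := by
  intro l
  induction l with
  | nil => intro acc; simp
  | cons x xs ih =>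
      intro acc
      have hx : ∀ a : List Char,
          (if x.2 = '0' then
            (if x.1 < (vb.length : Int) then
               PySem.List.pyGetD vb.reverse x.1 '?' else '0') :: a
          else if x.2 = '1' then x.2 :: a
          else 'X' :: a) = pvBitA vb x :: a := by
        intro a; unfold pvBitA; split_ifs <;> rfl
      simp only [List.foldl_cons, hx, ih, List.map_cons, List.reverse_cons, List.append_assoc,
        List.singleton_append]

theorem pv_getElem_congr {α : Type} (xs : List α) (k k' : Nat) (h : k < xs.length)
    (hkk : k = k') : xs[k]'h = xs[k']'(hkk ▸ h) := by subst hkk; rfl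

theorem pv_core (vb L : List Char) :
    ((PySem.List.enumerate L.reverse 0).map (pvBitA vb)).reverse
      = (L.zip (List.replicate (L.length -
            (if L = [] then ([] : List Char)
             else PySem.List.slice vb (some (-(L.length : Int))) none).length) '0' ++
          (if L = [] then ([] : List Char)
           else PySem.List.slice vb (some (-(L.length : Int))) none))).map
          (fun q => if q.1 = '0' then q.2 else if q.1 = '1' then q.1 else 'X') := by
  rcases eq_or_ne L [] with rfl | hL
  · simp
  · have hn : 0 < L.length := List.length_pos_iff.mpr hL
    simp only [if_neg hL]
    rw [PySem.List.slice_from_neg_natCast vb L.length hn]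
    apply List.ext_getElem
    · simp [PySem.List.length_enumerate]
      omega
    · intro j h1 h2
      have hj : j < L.length := by
        simpa [PySem.List.length_enumerate] using h1
      simp only [List.getElem_reverse, List.getElem_map, List.length_map,
        PySem.List.length_enumerate, List.length_reverse]
      rw [PySem.List.getElem_enumerate L.reverse 0 (L.length - 1 - j)
        (by simp [PySem.List.length_enumerate]; omega)]
      simp only [List.getElem_reverse, zero_add]
      rw [pv_getElem_congr L (L.length - 1 - (L.length - 1 - j)) j (by omega) (by omega)]
      rw [List.getElem_zip]
      unfold pvBitA
      rcases eq_or_ne (L[j]'(by omega)) '0' with h0 | h0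
      · simp only [h0, if_true]
        by_cases hcase : j + vb.length < L.length
        · -- padded char is a padding '0'; A's bounds check fails
          have hcond : ¬ (((L.length - 1 - j : Nat) : Int) < (vb.length : Int)) := by
            omega
          rw [if_neg hcond]
          rw [List.getElem_append_left (by simp; omega)]
          simp
        · -- both read the same bit of vb
          have hcond : (((L.length - 1 - j : Nat) : Int) < (vb.length : Int)) := by
            omega
          rw [if_pos hcond, PySem.List.pyGetD_natCast,
            List.getD_eq_getElem _ _ (by simp; omega)]
          rw [List.getElem_reverse]
          rw [List.getElem_append_right (by simp; omega)]
          rw [List.getElem_drop]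
          apply pv_getElem_congr
          simp
          omega
      · rcases eq_or_ne (L[j]'(by omega)) '1' with h1' | h1' <;>
          simp [h0, h1']

-- ===== VERDICT (by name: the statement is the Claim_ definition above) =====
theorem get_address_pattern_spec : Claim_equal_get_address_pattern := by
  intro mask value _
  unfold Spec_get_address_pattern get_address_pattern get_address_pattern_alt
  simp only [pv_foldA, List.append_nil]
  exact congrArg String.ofList (pv_core _ _)
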